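-- pv_equiv track=rewrite | github.com/pedrocarlo/leetcode | src/citadel/get_distinct_goodness_values.py | findMinimumEqualSum
-- ===== SOURCE A (Python) =====
-- from typing import List
--
-- def findMinimumEqualSum(arr: List[int]) -> List[int]:
--     ret = [0]
--     good_set = set()
--     good_set.add(0)
--     stack: list[tuple[int, int]] = [(0, 0)]
--
--     # Naive
--     for i in range(len(arr)):
--         curr = arr[i]
--         good_set.add(arr[i])
--
--         while stack and stack[-1][0] <= arr[i]:
--             val = stack.pop()
--             good_set.add(val[1])
--             curr |= val[1]
--
--         stack.append((arr[i], curr))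
--         good_set.add(curr)
--
--     ret = [val for val in good_set]
--     ret.sort()
--
--     return ret
-- ===== SOURCE B (Python) =====
-- def findMinimumEqualSum(arr):
--     # Stackless re-implementation: the OR value A's monotonic stack produces at
--     # index i is the OR of the contiguous run of elements back to (exclusive)
--     # the nearest previous element strictly greater than arr[i].  So scan that
--     # run directly instead of maintaining a stack of (value, or) pairs.
--     good = {0}
--     prev = []  # elements already processed, in order
--     for x in arr:
--         curr = x
--         for y in reversed(prev):
--             if y > x:
--                 break
--             curr |= y
--         good.add(x)
--         good.add(curr)
--         prev.append(x)
--     return sorted(good)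
-- ===== Notes on version B (the rewrite author's own statement) =====
-- stated objective: alternative
-- what changed: B removes A's monotonic (value, running-OR) stack entirely: for each element it rescans the already-processed elements backwards, OR-ing them until the first strictly greater one, which yields exactly the OR value A's stack pops accumulate; both then return the sorted set.
import Mathlib
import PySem

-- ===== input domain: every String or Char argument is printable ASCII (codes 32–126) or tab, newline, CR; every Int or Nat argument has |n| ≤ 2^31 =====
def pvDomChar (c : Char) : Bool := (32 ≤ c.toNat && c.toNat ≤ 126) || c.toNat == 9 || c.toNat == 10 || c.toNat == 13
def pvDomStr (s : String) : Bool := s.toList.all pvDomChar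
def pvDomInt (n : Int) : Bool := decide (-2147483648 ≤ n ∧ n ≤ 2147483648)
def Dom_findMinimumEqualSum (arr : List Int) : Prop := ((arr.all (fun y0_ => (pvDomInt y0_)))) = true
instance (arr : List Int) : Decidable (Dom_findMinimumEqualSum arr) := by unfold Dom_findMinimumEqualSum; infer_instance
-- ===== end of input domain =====

-- B replaces A's monotonic (value, running-OR) stack by a direct backward scan of the
-- already-processed elements (stopping at the first strictly greater one); same results,
-- alternative algorithm (A's stack is amortized O(n) per pass, B's rescan is O(n^2) worst case).

-- ===== PORT A =====
-- the Python 'while stack and stack[-1][0] <= arr[i]' loop (stack top = list head here);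
-- it threads the set because each pop does 'good_set.add(val[1])'
def popLoopA (x : Int) : PySem.Set Int → Int → List (Int × Int) → PySem.Set Int × Int × List (Int × Int)
  | s, curr, [] => (s, curr, [])
  | s, curr, (k, v) :: rest =>
    if k ≤ x then popLoopA x (PySem.Set.add s v) (PySem.Int.bor curr v) rest
    else (s, curr, (k, v) :: rest)

-- one iteration of A's 'for i in range(len(arr))' body (x = arr[i])
def stepA (st : PySem.Set Int × List (Int × Int)) (x : Int) : PySem.Set Int × List (Int × Int) :=
  let s1 := PySem.Set.add st.1 x
  let r := popLoopA x s1 x st.2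
  (PySem.Set.add r.1 r.2.1, (x, r.2.1) :: r.2.2)

def findMinimumEqualSum (arr : List Int) : List Int :=
  PySem.List.sorted (arr.foldl stepA (PySem.Set.add PySem.Set.empty 0, [(0, 0)])).1
    (fun v => v) false

-- ===== PORT B =====
-- Source B's inner 'for y in prev: if y > x: break; curr |= y'
def scanBack (x : Int) : Int → List Int → Int
  | curr, [] => curr
  | curr, y :: rest => if y > x then curr else scanBack x (PySem.Int.bor curr y) rest

-- one iteration of Source B's 'for x in arr' body; st.2 is 'prev', 'reversed(prev)' is st.2.reverse
def stepB (st : PySem.Set Int × List Int) (x : Int) : PySem.Set Int × List Int :=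
  let curr := scanBack x x st.2.reverse
  (PySem.Set.add (PySem.Set.add st.1 x) curr, st.2 ++ [x])

def findMinimumEqualSum_alt (arr : List Int) : List Int :=
  PySem.List.sorted (arr.foldl stepB (PySem.Set.add PySem.Set.empty 0, [])).1
    (fun v => v) false

-- ===== PRECONDITION & SPEC =====
def Spec_findMinimumEqualSum (arr : List Int) (out : List Int) : Prop := out = findMinimumEqualSum_alt arr
instance (arr : List Int) (out : List Int) : Decidable (Spec_findMinimumEqualSum arr out) := by unfold Spec_findMinimumEqualSum; infer_instance

-- ===== CLAIM (what is proved, stated in full; the proofs are below) =====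
def Claim_equal_findMinimumEqualSum : Prop := ∀ (arr : List Int), Dom_findMinimumEqualSum arr → Spec_findMinimumEqualSum arr (findMinimumEqualSum arr)

-- ===== LEMMAS AND PROOFS =====

-- ---- associativity of Python's int '|' (PySem.Int.bor), via bit extensionality ----

theorem pvAndModTwo (m n : Nat) : (m &&& n) % 2 = (m % 2) &&& (n % 2) := by
  rw [← Nat.and_one_is_mod, ← Nat.and_one_is_mod, ← Nat.and_one_is_mod,
    Nat.land_assoc, Nat.land_assoc]
  congr 1
  rw [Nat.land_comm 1, Nat.land_assoc]
  rfl

theorem pvSubAndTestBit (k m n : Nat) :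
    (m - (m &&& n)).testBit k = (m.testBit k && !(n.testBit k)) := by
  induction k generalizing m n with
  | zero =>
    have hand : (m &&& n) = 2 * ((m / 2) &&& (n / 2)) + ((m % 2) &&& (n % 2)) := by
      have h1 : (m &&& n) / 2 = m / 2 &&& n / 2 := Nat.and_div_two
      have h2 := pvAndModTwo m n
      omega
    have hb1 : (m / 2) &&& (n / 2) ≤ m / 2 := Nat.and_le_left
    have hb2 : (m % 2) &&& (n % 2) ≤ m % 2 := Nat.and_le_left
    simp only [Nat.testBit_zero]
    have : (m - (m &&& n)) % 2 = m % 2 - ((m % 2) &&& (n % 2)) := by omega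
    rw [this]
    rcases Nat.mod_two_eq_zero_or_one m with hm | hm <;>
      rcases Nat.mod_two_eq_zero_or_one n with hn | hn <;> rw [hm, hn] <;> decide
  | succ k ih =>
    have hand : (m &&& n) = 2 * ((m / 2) &&& (n / 2)) + ((m % 2) &&& (n % 2)) := by
      have h1 : (m &&& n) / 2 = m / 2 &&& n / 2 := Nat.and_div_two
      have h2 := pvAndModTwo m n
      omega
    have hb1 : (m / 2) &&& (n / 2) ≤ m / 2 := Nat.and_le_left
    have hb2 : (m % 2) &&& (n % 2) ≤ m % 2 := Nat.and_le_left
    rw [Nat.testBit_succ, Nat.testBit_succ, Nat.testBit_succ]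
    have : (m - (m &&& n)) / 2 = m / 2 - ((m / 2) &&& (n / 2)) := by omega
    rw [this, ih]

-- the k-th bit of an integer in infinite two's complement
def pvTb (a : Int) (k : Nat) : Bool :=
  if 0 ≤ a then a.toNat.testBit k else !((-a - 1).toNat.testBit k)

theorem pvTb_bor (a b : Int) (k : Nat) :
    pvTb (PySem.Int.bor a b) k = (pvTb a k || pvTb b k) := by
  unfold pvTb PySem.Int.bor
  by_cases ha : 0 ≤ a <;> by_cases hb : 0 ≤ b <;> simp only [ha, hb, if_true, if_false]
  · have h : (0:Int) ≤ ((a.toNat ||| b.toNat : Nat) : Int) := Int.natCast_nonneg _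
    simp [h, Nat.testBit_or]
  · have hx : (0:Int) ≤ ((((-b - 1).toNat - ((-b - 1).toNat &&& a.toNat) : Nat)) : Int) := Int.natCast_nonneg _
    have h : ¬ (0:Int) ≤ -(((-b - 1).toNat - ((-b - 1).toNat &&& a.toNat) : Nat) : Int) - 1 := by omega
    simp only [h, if_false]
    have : (-(-(((-b - 1).toNat - ((-b - 1).toNat &&& a.toNat) : Nat) : Int) - 1) - 1).toNat
        = (-b - 1).toNat - ((-b - 1).toNat &&& a.toNat) := by omega
    rw [this, pvSubAndTestBit]
    cases (-b - 1).toNat.testBit k <;> cases a.toNat.testBit k <;> rfl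
  · have hx : (0:Int) ≤ ((((-a - 1).toNat - ((-a - 1).toNat &&& b.toNat) : Nat)) : Int) := Int.natCast_nonneg _
    have h : ¬ (0:Int) ≤ -(((-a - 1).toNat - ((-a - 1).toNat &&& b.toNat) : Nat) : Int) - 1 := by omega
    simp only [h, if_false]
    have : (-(-(((-a - 1).toNat - ((-a - 1).toNat &&& b.toNat) : Nat) : Int) - 1) - 1).toNat
        = (-a - 1).toNat - ((-a - 1).toNat &&& b.toNat) := by omega
    rw [this, pvSubAndTestBit]
    cases (-a - 1).toNat.testBit k <;> cases b.toNat.testBit k <;> rfl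
  · have hx : (0:Int) ≤ (((-a - 1).toNat &&& (-b - 1).toNat : Nat) : Int) := Int.natCast_nonneg _
    have h : ¬ (0:Int) ≤ -(((-a - 1).toNat &&& (-b - 1).toNat : Nat) : Int) - 1 := by omega
    simp only [h, if_false]
    have : (-(-(((-a - 1).toNat &&& (-b - 1).toNat : Nat) : Int) - 1) - 1).toNat
        = (-a - 1).toNat &&& (-b - 1).toNat := by omega
    rw [this, Nat.testBit_and]
    cases (-a - 1).toNat.testBit k <;> cases (-b - 1).toNat.testBit k <;> rfl

theorem pvTb_ext {a b : Int} (h : ∀ k, pvTb a k = pvTb b k) : a = b := by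
  by_cases ha : 0 ≤ a <;> by_cases hb : 0 ≤ b
  · have : a.toNat = b.toNat := Nat.eq_of_testBit_eq fun k => by
      have := h k; simpa [pvTb, ha, hb] using this
    omega
  · exfalso
    set x := a.toNat
    set y := (-b - 1).toNat
    have hk := h (max x y)
    have h1 : x.testBit (max x y) = false :=
      Nat.testBit_eq_false_of_lt (lt_of_le_of_lt (Nat.le_max_left x y) Nat.lt_two_pow_self)
    have h2 : y.testBit (max x y) = false :=
      Nat.testBit_eq_false_of_lt (lt_of_le_of_lt (Nat.le_max_right x y) Nat.lt_two_pow_self)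
    simp only [pvTb, ha, hb, if_true, if_false] at hk
    rw [h1, h2] at hk
    simp at hk
  · exfalso
    set x := b.toNat
    set y := (-a - 1).toNat
    have hk := h (max x y)
    have h1 : x.testBit (max x y) = false :=
      Nat.testBit_eq_false_of_lt (lt_of_le_of_lt (Nat.le_max_left x y) Nat.lt_two_pow_self)
    have h2 : y.testBit (max x y) = false :=
      Nat.testBit_eq_false_of_lt (lt_of_le_of_lt (Nat.le_max_right x y) Nat.lt_two_pow_self)
    simp only [pvTb, ha, hb, if_true, if_false] at hk
    rw [h1, h2] at hk
    simp at hk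
  · have : (-a - 1).toNat = (-b - 1).toNat := Nat.eq_of_testBit_eq fun k => by
      have := h k; simp only [pvTb, ha, hb, if_false, Bool.not_inj_iff] at this; exact this
    omega

theorem pvBorAssoc (a b c : Int) :
    PySem.Int.bor (PySem.Int.bor a b) c = PySem.Int.bor a (PySem.Int.bor b c) := by
  apply pvTb_ext
  intro k
  simp [pvTb_bor, Bool.or_assoc]

theorem pvZeroBor (a : Int) : PySem.Int.bor 0 a = a := by
  rw [PySem.Int.bor_comm, PySem.Int.bor_zero]

-- ---- proof-side description of A's stack ----

-- A's pop loop without the set (the set is only written to, see popLoopA_set)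
def popP (x : Int) : Int → List (Int × Int) → Int × List (Int × Int)
  | curr, [] => (curr, [])
  | curr, (k, v) :: rest =>
    if k ≤ x then popP x (PySem.Int.bor curr v) rest else (curr, (k, v) :: rest)

def pushP (st : List (Int × Int)) (x : Int) : List (Int × Int) :=
  (x, (popP x x st).1) :: (popP x x st).2

-- A's stack after processing prefix p
def Astk (p : List Int) : List (Int × Int) := p.foldl pushP [(0, 0)]

-- OR of the elements of l up to (exclusive) the first one strictly greater than x
def gOr (x : Int) : List Int → Int
  | [] => 0
  | a :: l => if x < a then 0 else PySem.Int.bor a (gOr x l)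

-- A's stack after the pop loop for x, as a function of the processed prefix p
def remP (x : Int) (p : List Int) : List (Int × Int) :=
  let d := p.reverse.dropWhile (fun a => decide (a ≤ x))
  if 0 ≤ x ∧ d = [] then [] else Astk d.reverse

theorem popLoopA_set (x : Int) (st : List (Int × Int)) :
    ∀ (s : PySem.Set Int) (curr : Int), (∀ e ∈ st, e.2 ∈ s) →
      popLoopA x s curr st = (s, popP x curr st) := by
  induction st with
  | nil => intro s curr _; rfl
  | cons e rest ih =>
    intro s curr hmem
    obtain ⟨k, v⟩ := e
    by_cases hk : k ≤ x
    · have hv : v ∈ s := hmem (k, v) (List.mem_cons_self)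
      simp only [popLoopA, popP, hk, if_true, PySem.Set.add_of_mem hv]
      exact ih s _ (fun e he => hmem e (List.mem_cons_of_mem _ he))
    · simp [popLoopA, popP, hk]

theorem popP_rest_sub (x : Int) (st : List (Int × Int)) :
    ∀ (curr : Int) (e : Int × Int), e ∈ (popP x curr st).2 → e ∈ st := by
  induction st with
  | nil => intro curr e he; simp [popP] at he
  | cons p rest ih =>
    intro curr e he
    obtain ⟨k, v⟩ := p
    by_cases hk : k ≤ x
    · simp only [popP, hk, if_true] at he
      exact List.mem_cons_of_mem _ (ih _ e he)
    · simpa [popP, hk] using he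

theorem scanBack_gOr (x : Int) (l : List Int) :
    ∀ c, scanBack x c l = PySem.Int.bor c (gOr x l) := by
  induction l with
  | nil => intro c; simp [scanBack, gOr, PySem.Int.bor_zero]
  | cons a l ih =>
    intro c
    by_cases h : x < a
    · simp [scanBack, gOr, h, PySem.Int.bor_zero]
    · simp only [scanBack, gOr, h, if_false, ih, pvBorAssoc]

theorem gOr_dropWhile {x y : Int} (hxy : y ≤ x) (l : List Int) :
    gOr x l = PySem.Int.bor (gOr y l) (gOr x (l.dropWhile (fun a => decide (a ≤ y)))) := by
  induction l with
  | nil => simp [gOr]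
  | cons a l ih =>
    by_cases h : a ≤ y
    · have hya : ¬ y < a := not_lt.mpr h
      have hxa : ¬ x < a := not_lt.mpr (le_trans h hxy)
      simp [h, gOr, hya, hxa, ih, pvBorAssoc]
    · have hya : y < a := not_le.mp h
      simp [h, gOr, hya, pvZeroBor]

theorem dropWhile_dropWhile {x y : Int} (hxy : y ≤ x) (l : List Int) :
    (l.dropWhile (fun a => decide (a ≤ y))).dropWhile (fun a => decide (a ≤ x))
      = l.dropWhile (fun a => decide (a ≤ x)) := by
  induction l with
  | nil => rfl
  | cons a l ih =>
    by_cases h : a ≤ y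
    · have hx : a ≤ x := le_trans h hxy
      simp [h, hx, ih]
    · simp [List.dropWhile_cons, h]

theorem Astk_concat (q : List Int) (y : Int) : Astk (q ++ [y]) = pushP (Astk q) y := by
  simp [Astk, List.foldl_append]

theorem popP_Astk : ∀ (n : Nat) (p : List Int), p.length ≤ n → ∀ (x c : Int),
    popP x c (Astk p) = (PySem.Int.bor c (gOr x p.reverse), remP x p) := by
  intro n
  induction n with
  | zero =>
    intro p hp x c
    have : p = [] := List.eq_nil_of_length_eq_zero (Nat.le_zero.mp hp)
    subst this
    by_cases hx : (0:Int) ≤ x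
    · simp [Astk, popP, remP, gOr, hx, PySem.Int.bor_zero]
    · simp [Astk, popP, remP, gOr, hx, PySem.Int.bor_zero]
  | succ n ih =>
    intro p hp x c
    rcases List.eq_nil_or_concat p with hnil | ⟨q, y, rfl⟩
    · subst hnil
      by_cases hx : (0:Int) ≤ x
      · simp [Astk, popP, remP, gOr, hx, PySem.Int.bor_zero]
      · simp [Astk, popP, remP, gOr, hx, PySem.Int.bor_zero]
    · rw [List.concat_eq_append] at hp ⊢
      have hq : q.length ≤ n := by
        have := hp; simp [List.length_append] at this; omega
      have hrev : (q ++ [y]).reverse = y :: q.reverse := by simp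
      have hAstk : Astk (q ++ [y]) = (y, PySem.Int.bor y (gOr y q.reverse)) :: remP y q := by
        rw [Astk_concat, pushP, ih q hq y y]
      by_cases hxy : y ≤ x
      · -- the pushed entry is popped
        have hd : (q ++ [y]).reverse.dropWhile (fun a => decide (a ≤ x))
            = q.reverse.dropWhile (fun a => decide (a ≤ x)) := by
          rw [hrev, List.dropWhile_cons]
          simp [hxy]
        have hgor : gOr x ((q ++ [y]).reverse) = PySem.Int.bor y (gOr x q.reverse) := by
          rw [hrev]; simp [gOr, not_lt.mpr hxy]
        rw [hAstk]
        simp only [popP, hxy, if_true]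
        set dy := q.reverse.dropWhile (fun a => decide (a ≤ y)) with hdy
        by_cases h0 : 0 ≤ y ∧ dy = []
        · -- the rest of the stack is empty
          have hrem : remP y q = [] := by rw [remP]; simp [← hdy, h0]
          have hdx : q.reverse.dropWhile (fun a => decide (a ≤ x)) = [] := by
            rw [← dropWhile_dropWhile hxy q.reverse, ← hdy, h0.2]; rfl
          have hgq : gOr x q.reverse = gOr y q.reverse := by
            rw [gOr_dropWhile hxy q.reverse, ← hdy, h0.2]
            simp [gOr, PySem.Int.bor_zero]
          rw [hrem]
          simp only [popP]
          rw [Prod.mk.injEq]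
          constructor
          · rw [hgor, hgq]
          · rw [remP, hd, hdx]
            simp [le_trans h0.1 hxy]
        · -- the rest of the stack is the stack of the shorter prefix dy.reverse
          have hrem : remP y q = Astk dy.reverse := by rw [remP]; simp only [← hdy, h0, if_false]
          have hlen : dy.reverse.length ≤ n := by
            have h1 : dy.length ≤ q.reverse.length :=
              (List.dropWhile_sublist _).length_le
            simp at h1 ⊢; omega
          rw [hrem, ih dy.reverse hlen x _]
          rw [Prod.mk.injEq]
          have hddx : dy.reverse.reverse.dropWhile (fun a => decide (a ≤ x))
              = q.reverse.dropWhile (fun a => decide (a ≤ x)) := by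
            rw [List.reverse_reverse, hdy, dropWhile_dropWhile hxy]
          constructor
          · rw [List.reverse_reverse, hgor, hdy,
              gOr_dropWhile hxy q.reverse, ← hdy, ← pvBorAssoc, ← pvBorAssoc, pvBorAssoc]
          · rw [remP, remP, hddx, hd]
      · -- strictly greater: nothing is popped
        have hgor : gOr x ((q ++ [y]).reverse) = 0 := by
          rw [hrev]; simp [gOr, not_le.mp hxy]
        have hrem : remP x (q ++ [y]) = Astk (q ++ [y]) := by
          rw [remP, hrev, List.dropWhile_cons]
          have : ¬ (y ≤ x) := hxy
          simp only [this, decide_false, Bool.false_eq_true, if_false]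
          simp
        rw [hAstk, popP]
        simp only [hxy, if_false]
        rw [hgor, PySem.Int.bor_zero, hrem, hAstk]

-- the two folds keep identical sets; A's stack is Astk p, B's 'prev' is p.reverse
theorem fold_sets_eq : ∀ (rest p : List Int) (s : PySem.Set Int),
    (∀ e ∈ Astk p, e.2 ∈ s) →
    (rest.foldl stepA (s, Astk p)).1 = (rest.foldl stepB (s, p)).1 := by
  intro rest
  induction rest with
  | nil => intro p s _; rfl
  | cons x rest ih =>
    intro p s hmem
    have hpop := popP_Astk (p.length) p le_rfl x x
    have hmem1 : ∀ e ∈ Astk p, e.2 ∈ PySem.Set.add s x := fun e he =>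
      (PySem.Set.mem_add _ _ _).mpr (Or.inl (hmem e he))
    have hA : stepA (s, Astk p) x
        = (PySem.Set.add (PySem.Set.add s x) (PySem.Int.bor x (gOr x p.reverse)),
           Astk (p ++ [x])) := by
      rw [stepA]
      simp only [popLoopA_set x (Astk p) (PySem.Set.add s x) x hmem1, hpop]
      rw [Astk_concat, pushP, hpop]
    have hB : stepB (s, p) x
        = (PySem.Set.add (PySem.Set.add s x) (PySem.Int.bor x (gOr x p.reverse)),
           p ++ [x]) := by
      rw [stepB]
      simp [scanBack_gOr]
    rw [List.foldl_cons, List.foldl_cons, hA, hB]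
    apply ih (p ++ [x])
    intro e he
    rw [Astk_concat, pushP, hpop] at he
    rcases List.mem_cons.mp he with heq | hin
    · subst heq
      exact (PySem.Set.mem_add _ _ _).mpr (Or.inr rfl)
    · have : e ∈ Astk p := by
        have h2 := popP_rest_sub x (Astk p) x e
        rw [hpop] at h2
        exact h2 hin
      exact (PySem.Set.mem_add _ _ _).mpr (Or.inl (hmem1 e this))

-- ===== VERDICT (by name: the statement is the Claim_ definition above) =====
theorem findMinimumEqualSum_spec : Claim_equal_findMinimumEqualSum := by
  intro arr _
  unfold Spec_findMinimumEqualSum findMinimumEqualSum findMinimumEqualSum_alt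
  have h0 : ∀ e ∈ Astk [], e.2 ∈ PySem.Set.add PySem.Set.empty 0 := by
    intro e he
    have : e = (0, 0) := by simpa [Astk] using he
    subst this
    exact (PySem.Set.mem_add _ _ _).mpr (Or.inr rfl)
  have := fold_sets_eq arr [] (PySem.Set.add PySem.Set.empty 0) h0
  rw [show Astk [] = [(0, 0)] from rfl] at this
  rw [this]
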